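-- pv_equiv track=rewrite | github.com/qu-jiagang/DeskVane | deskvane/ui/tray_actions.py | node_host_token
-- ===== SOURCE A (Python) =====
-- def node_host_token(node: str) -> str:
--     if "@" not in node:
--         return ""
--     host = node.rsplit("@", 1)[-1].strip()
--     if not host:
--         return ""
--     for sep in ("/", ":", "."):
--         if sep in host:
--             host = host.split(sep, 1)[0]
--     return host.strip()
-- ===== SOURCE B (Python) =====
-- def node_host_token(node: str) -> str:
--     if "@" not in node:
--         return ""
--     host = node.rsplit("@", 1)[-1].strip()
--     if not host:
--         return ""
--     out = []
--     for ch in host: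
--         if ch in "/:.":
--             break
--         out.append(ch)
--     return "".join(out).strip()
-- ===== Notes on version B (the rewrite author's own statement) =====
-- stated objective: simpler
-- what changed: Replaces A's three sequential conditional split(sep,1)[0] truncations of host by a single left-to-right scan that stops at the first separator character.
import Mathlib
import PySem

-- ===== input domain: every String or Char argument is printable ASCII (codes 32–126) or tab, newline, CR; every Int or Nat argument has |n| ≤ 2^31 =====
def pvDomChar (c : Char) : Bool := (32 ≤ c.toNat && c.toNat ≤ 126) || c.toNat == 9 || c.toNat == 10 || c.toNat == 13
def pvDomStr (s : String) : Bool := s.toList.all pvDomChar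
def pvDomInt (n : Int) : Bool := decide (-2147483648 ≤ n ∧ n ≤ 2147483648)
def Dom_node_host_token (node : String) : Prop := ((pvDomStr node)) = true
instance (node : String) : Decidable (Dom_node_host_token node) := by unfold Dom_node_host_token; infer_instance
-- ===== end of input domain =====

-- B replaces A's three sequential split(sep,1)[0] truncations by one left-to-right
-- scan that stops at the first separator character (simpler: one pass, one rule).

-- ===== PORT A =====
-- split(sep,1)[0] for a single-char sep is the prefix before the first occurrence
-- of that char, i.e. takeWhile (· != sep); exact because sep is one character.
def node_host_token (node : String) : String :=
  if PySem.Str.isIn "@" node = false then ""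
  else
    -- node.rsplit("@", 1)[-1] = everything after the LAST '@' (rfind, then drop)
    let cs := node.toList
    let host := PySem.Chars.strip (cs.drop ((PySem.Chars.rfind cs ['@']).toNat + 1))
    if host = [] then ""
    else
      let host := if PySem.Chars.isIn ['/'] host then host.takeWhile (· != '/') else host
      let host := if PySem.Chars.isIn [':'] host then host.takeWhile (· != ':') else host
      let host := if PySem.Chars.isIn ['.'] host then host.takeWhile (· != '.') else host
      String.ofList (PySem.Chars.strip host)

-- ===== PORT B =====
-- the 'for ch in host: if ch in "/:.": break; out.append(ch)' loop of Source B
def scanB : List Char → List Char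
  | [] => []
  | c :: rest => if c == '/' || c == ':' || c == '.' then [] else c :: scanB rest

def node_host_token_alt (node : String) : String :=
  if PySem.Str.isIn "@" node = false then ""
  else
    let cs := node.toList
    let host := PySem.Chars.strip (cs.drop ((PySem.Chars.rfind cs ['@']).toNat + 1))
    if host = [] then ""
    else String.ofList (PySem.Chars.strip (scanB host))

-- ===== PRECONDITION & SPEC =====
def Spec_node_host_token (node : String) (out : String) : Prop := out = node_host_token_alt node
instance (node : String) (out : String) : Decidable (Spec_node_host_token node out) := by unfold Spec_node_host_token; infer_instance

-- ===== CLAIM (what is proved, stated in full; the proofs are below) =====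
def Claim_equal_node_host_token : Prop := ∀ (node : String), Dom_node_host_token node → Spec_node_host_token node (node_host_token node)

-- ===== LEMMAS AND PROOFS =====

theorem takeWhile_of_not_mem {l : List Char} {b : Char} (h : b ∉ l) :
    l.takeWhile (· != b) = l := by
  induction l with
  | nil => rfl
  | cons c rest ih =>
    simp only [List.mem_cons, not_or] at h
    simp [bne_iff_ne, Ne.symm h.1, ih h.2]

theorem cut_step (l : List Char) (b : Char) :
    (if PySem.Chars.isIn [b] l then l.takeWhile (· != b) else l)
      = l.takeWhile (· != b) := by
  by_cases h : PySem.Chars.isIn [b] l = true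
  · simp [h]
  · have hb : b ∉ l := by
      intro hmem
      have : PySem.Chars.isIn [b] l = true := by
        rw [PySem.Chars.isIn_iff_infix]
        obtain ⟨s, t, rfl⟩ := List.append_of_mem hmem
        exact ⟨s, t, by simp⟩
      exact h this
    simp [h, takeWhile_of_not_mem hb]

theorem scanB_eq_takeWhile (l : List Char) :
    scanB l = l.takeWhile (fun c => !(c == '/' || c == ':' || c == '.')) := by
  induction l with
  | nil => rfl
  | cons c rest ih =>
    by_cases h : (c == '/' || c == ':' || c == '.') = true
    · have hp : (!(c == '/' || c == ':' || c == '.')) = false := by simp [h]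
      rw [scanB, if_pos h, List.takeWhile_cons, hp]
      simp
    · have hp : (!(c == '/' || c == ':' || c == '.')) = true := by simp [h]
      rw [scanB, if_neg h, List.takeWhile_cons, hp, ih]
      simp

theorem takeWhile_takeWhile' (p q : Char → Bool) (l : List Char) :
    (l.takeWhile p).takeWhile q = l.takeWhile (fun c => p c && q c) := by
  induction l with
  | nil => rfl
  | cons c rest ih =>
    by_cases hp : p c = true
    · by_cases hq : q c = true
      · simp [hp, hq, ih]
      · simp [hp, hq]
    · simp [hp]

theorem cut3_eq_scanB (host : List Char) :
    (let h1 := if PySem.Chars.isIn ['/'] host then host.takeWhile (· != '/') else host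
     let h2 := if PySem.Chars.isIn [':'] h1 then h1.takeWhile (· != ':') else h1
     if PySem.Chars.isIn ['.'] h2 then h2.takeWhile (· != '.') else h2)
      = scanB host := by
  have hpq : (fun c => (c != '/') && ((c != ':') && (c != '.')))
      = (fun c => !(c == '/' || c == ':' || c == '.')) := by
    funext c
    cases hc : c == '/' <;> cases hc2 : c == ':' <;> cases hc3 : c == '.' <;>
      simp [bne, hc, hc2, hc3]
  simp only [cut_step]
  rw [takeWhile_takeWhile', takeWhile_takeWhile', scanB_eq_takeWhile, hpq]

-- ===== VERDICT (by name: the statement is the Claim_ definition above) =====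
theorem node_host_token_spec : Claim_equal_node_host_token := by
  intro node _
  unfold Spec_node_host_token node_host_token node_host_token_alt
  simp only [PySem.Str.isIn]
  by_cases hat : PySem.Chars.isIn "@".toList node.toList = false
  · rw [if_pos hat, if_pos hat]
  · rw [if_neg hat, if_neg hat]
    by_cases hhost : PySem.Chars.strip ((node.toList).drop ((PySem.Chars.rfind node.toList ['@']).toNat + 1)) = []
    · rw [if_pos hhost, if_pos hhost]
    · rw [if_neg hhost, if_neg hhost]
      rw [cut3_eq_scanB]
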